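-- pv_equiv track=rewrite | github.com/kz8519/crimtech-comp-f20 | python/rm_smallest.py | rm_smallest
-- ===== SOURCE A (Python) =====
-- def rm_smallest(d):
--     # Your code here!
--     if (bool(d)):
--         min_val = min(d.values())
--         keys = d.keys()
--         for x in keys:
--             if d[x] == min_val:
--                 del d[x]
--                 break
--     return d
-- ===== SOURCE B (Python) =====
-- def rm_smallest(d):
--     best_key = None
--     best_val = None
--     for k, v in d.items():
--         if best_val is None or v < best_val:
--             best_key = k
--             best_val = v
--     if best_key is not None:
--         del d[best_key]
--     return d
-- ===== Notes on version B (the rewrite author's own statement) =====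
-- stated objective: simpler
-- what changed: Replaces min(d.values()) followed by a second scan over d.keys() searching for a key with that value by a single pass over d.items() that maintains the running minimum and its first key, then deletes that key.
import Mathlib
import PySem

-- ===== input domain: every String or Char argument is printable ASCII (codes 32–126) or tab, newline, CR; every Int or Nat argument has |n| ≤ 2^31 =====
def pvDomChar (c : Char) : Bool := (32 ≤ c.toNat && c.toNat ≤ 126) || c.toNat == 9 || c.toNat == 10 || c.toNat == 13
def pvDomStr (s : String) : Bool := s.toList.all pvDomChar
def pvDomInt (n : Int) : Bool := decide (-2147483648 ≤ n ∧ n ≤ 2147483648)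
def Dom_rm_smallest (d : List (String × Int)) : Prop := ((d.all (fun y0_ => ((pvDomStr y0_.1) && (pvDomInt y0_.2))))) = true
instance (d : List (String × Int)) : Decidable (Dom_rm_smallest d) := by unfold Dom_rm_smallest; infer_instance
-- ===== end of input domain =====

-- B replaces A's min()-then-rescan with one pass tracking the running minimum and its first key
-- (both A and B mutate the dict in place; the equivalence proved is about the returned value).


-- ===== PORT A =====
-- d[x] : first-match lookup in the association list (a Python dict)
def pvDGet : List (String × Int) → String → Option Int
  | [], _ => none
  | (k, v) :: t, x => if k = x then some v else pvDGet t x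

-- del d[x] : remove the (first) pair with key x
def pvDErase : List (String × Int) → String → List (String × Int)
  | [], _ => []
  | (k, v) :: t, x => if k = x then t else (k, v) :: pvDErase t x

-- 'for x in keys: if d[x] == min_val: del d[x]; break'
def pvRmLoop (d : List (String × Int)) (m : Int) : List String → List (String × Int)
  | [] => d
  | x :: rest => if pvDGet d x = some m then pvDErase d x else pvRmLoop d m rest

def rm_smallest (d : List (String × Int)) : List (String × Int) :=
  if d = [] then d
  else
    match PySem.List.min? (d.map Prod.snd) (fun x => x) with
    | none => d
    | some m => pvRmLoop d m (d.map Prod.fst)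

-- ===== PORT B =====
-- the single pass: for k, v in d.items(): if best_val is None or v < best_val: best := (k, v)
def pvBestLoop : List (String × Int) → Option String × Option Int → Option String × Option Int
  | [], best => best
  | (k, v) :: t, (bk, bv) =>
    match bv with
    | none => pvBestLoop t (some k, some v)
    | some bvv => if v < bvv then pvBestLoop t (some k, some v) else pvBestLoop t (bk, some bvv)

def rm_smallest_alt (d : List (String × Int)) : List (String × Int) :=
  match (pvBestLoop d (none, none)).1 with
  | none => d
  | some k => pvDErase d k

-- ===== PRECONDITION & SPEC =====
-- Pre_ states the Python dict invariant: the association list has pairwise-distinct keys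
-- (every input actually passed to the Python functions, which take a dict, satisfies it).
def Pre_rm_smallest (d : List (String × Int)) : Prop := (d.map Prod.fst).Nodup
instance (d : List (String × Int)) : Decidable (Pre_rm_smallest d) := by unfold Pre_rm_smallest; infer_instance
def pvWitness_rm_smallest : (List (String × Int)) := [("a", 3), ("b", 1), ("c", 1)]

def Spec_rm_smallest (d : List (String × Int)) (out : List (String × Int)) : Prop := out = rm_smallest_alt d
instance (d : List (String × Int)) (out : List (String × Int)) : Decidable (Spec_rm_smallest d out) := by unfold Spec_rm_smallest; infer_instance

-- ===== CLAIM (what is proved, stated in full; the proofs are below) =====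
def Claim_equal_rm_smallest : Prop := ∀ (d : List (String × Int)), Dom_rm_smallest d → Pre_rm_smallest d → Spec_rm_smallest d (rm_smallest d)

-- ===== LEMMAS AND PROOFS =====

-- first pair with minimal value (head wins ties): the common characterisation of both ports
def pvFMin : List (String × Int) → Option (String × Int)
  | [] => none
  | (k, v) :: t =>
    match pvFMin t with
    | none => some (k, v)
    | some (k', v') => if v ≤ v' then some (k, v) else some (k', v')

theorem pvFMin_mem (d : List (String × Int)) (p : String × Int) (h : pvFMin d = some p) : p ∈ d := by
  obtain ⟨pk, pv⟩ := p
  induction d with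
  | nil => simp [pvFMin] at h
  | cons q t ih =>
    obtain ⟨k, v⟩ := q
    cases hq : pvFMin t with
    | none =>
      simp only [pvFMin, hq] at h
      simp only [Option.some_inj, Prod.mk.injEq] at h
      obtain ⟨h1, h2⟩ := h; subst h1; subst h2; simp
    | some r =>
      obtain ⟨k', v'⟩ := r
      simp only [pvFMin, hq] at h
      split at h <;> simp only [Option.some_inj, Prod.mk.injEq] at h <;>
        obtain ⟨h1, h2⟩ := h <;> subst h1 <;> subst h2
      · simp
      · exact List.mem_cons_of_mem _ (ih hq)

-- first key with value m
def pvFKey (m : Int) : List (String × Int) → Option String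
  | [] => none
  | (k, v) :: t => if v = m then some k else pvFKey m t

-- under distinct keys, d[k] is the value paired with k
theorem pvDGet_of_mem (d : List (String × Int)) (hnd : (d.map Prod.fst).Nodup)
    (k : String) (v : Int) (h : (k, v) ∈ d) : pvDGet d k = some v := by
  induction d with
  | nil => simp at h
  | cons p t ih =>
    obtain ⟨k0, v0⟩ := p
    simp only [List.map_cons, List.nodup_cons] at hnd
    rcases List.mem_cons.mp h with h1 | h1
    · simp at h1
      simp [pvDGet, h1.1, h1.2]
    · have hk : k0 ≠ k := by
        intro he; exact hnd.1 (he ▸ (List.mem_map.mpr ⟨(k, v), h1, rfl⟩))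
      simp [pvDGet, hk, ih hnd.2 h1]

-- A's search loop over the keys of s (looked up in the fixed dict d) finds pvFKey m s
theorem pvRmLoop_eq_fkey (d : List (String × Int)) (m : Int) (s : List (String × Int))
    (hs : ∀ p ∈ s, pvDGet d p.1 = some p.2) :
    pvRmLoop d m (s.map Prod.fst) =
      (match pvFKey m s with
       | none => d
       | some k => pvDErase d k) := by
  induction s with
  | nil => simp [pvRmLoop, pvFKey]
  | cons p t ih =>
    obtain ⟨k, v⟩ := p
    have hget : pvDGet d k = some v := hs (k, v) (by simp)
    by_cases hv : v = m
    · simp [pvRmLoop, pvFKey, hget, hv]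
    · have hne : ¬ (pvDGet d k = some m) := by simp [hget, hv]
      simp only [List.map_cons, pvRmLoop, pvFKey, hne, if_neg hv, if_false]
      exact ih (fun q hq => hs q (List.mem_cons_of_mem _ hq))

-- when m is the minimum value, the first key with value m is pvFMin's key,
-- and pvFMin's value is m
theorem pvFKey_eq_fmin (d : List (String × Int)) (m : Int)
    (hmem : m ∈ d.map Prod.snd) (hmin : ∀ y ∈ d.map Prod.snd, m ≤ y) :
    pvFKey m d = (pvFMin d).map Prod.fst ∧ (pvFMin d).map Prod.snd = some m := by
  induction d with
  | nil => simp at hmem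
  | cons p t ih =>
    obtain ⟨k, v⟩ := p
    have hvm : m ≤ v := hmin v (by simp)
    simp only [List.map_cons, List.mem_cons] at hmem
    by_cases hv : v = m
    · subst hv
      have hf : pvFMin ((k, v) :: t) = some (k, v) := by
        cases hq : pvFMin t with
        | none => simp [pvFMin, hq]
        | some r =>
          obtain ⟨k', v'⟩ := r
          have hv' : v ≤ v' :=
            hmin v' (List.mem_map.mpr ⟨(k', v'), List.mem_cons_of_mem _ (pvFMin_mem t _ hq), rfl⟩)
          simp [pvFMin, hq, hv']
      constructor
      · simp [pvFKey, hf]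
      · simp [hf]
    · have hmt : m ∈ t.map Prod.snd := by
        rcases hmem with h | h
        · exact absurd h.symm hv
        · exact h
      have hmint : ∀ y ∈ t.map Prod.snd, m ≤ y :=
        fun y hy => hmin y (List.mem_cons_of_mem _ hy)
      obtain ⟨ih1, ih2⟩ := ih hmt hmint
      cases hq : pvFMin t with
      | none => rw [hq] at ih2; simp at ih2
      | some r =>
        obtain ⟨k', v'⟩ := r
        rw [hq] at ih1 ih2
        simp only [Option.map_some] at ih1 ih2
        rw [Option.some_inj] at ih2
        have hfm : pvFMin ((k, v) :: t) = some (k', v') := by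
          simp only [pvFMin, hq]
          rw [if_neg (by omega : ¬ v ≤ v')]
        have hfk : pvFKey m ((k, v) :: t) = pvFKey m t := by
          simp [pvFKey, hv]
      -- goals
        constructor
        · rw [hfk, hfm, ih1]; rfl
        · rw [hfm]; simp [ih2]

-- B's pass with an already-set best equals merging that best with pvFMin of the rest
theorem pvBestLoop_some (t : List (String × Int)) (bk : String) (bv : Int) :
    pvBestLoop t (some bk, some bv) =
      (match pvFMin t with
       | none => (some bk, some bv)
       | some (k', v') => if v' < bv then (some k', some v') else (some bk, some bv)) := by
  induction t generalizing bk bv with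
  | nil => simp [pvBestLoop, pvFMin]
  | cons p t ih =>
    obtain ⟨k, v⟩ := p
    simp only [pvBestLoop, pvFMin]
    by_cases hvb : v < bv
    · rw [if_pos hvb, ih]
      cases hq : pvFMin t with
      | none => simp [hvb]
      | some r =>
        obtain ⟨k', v'⟩ := r
        by_cases h1 : v' < v
        · have h2 : ¬ v ≤ v' := by omega
          have h3 : v' < bv := by omega
          simp only [if_pos h1, if_pos h3, if_neg h2]
        · have h2 : v ≤ v' := by omega
          simp [h1, h2, hvb]
    · rw [if_neg hvb, ih]
      cases hq : pvFMin t with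
      | none => simp [hvb]
      | some r =>
        obtain ⟨k', v'⟩ := r
        by_cases h1 : v' < bv
        · have h2 : ¬ v ≤ v' := by omega
          simp [h1, h2]
        · by_cases h2 : v ≤ v'
          · simp [h2, hvb]; exact fun h => absurd h h1
          · have h3 : v' < v := by omega
            simp [h1, h2]

-- B's result: erase the key of the first minimal pair
theorem rm_smallest_alt_eq (d : List (String × Int)) :
    rm_smallest_alt d =
      (match pvFMin d with
       | none => d
       | some (k, _) => pvDErase d k) := by
  cases d with
  | nil => simp [rm_smallest_alt, pvBestLoop, pvFMin]
  | cons p t =>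
    obtain ⟨k, v⟩ := p
    simp only [rm_smallest_alt, pvBestLoop, pvBestLoop_some, pvFMin]
    cases hq : pvFMin t with
    | none => simp
    | some r =>
      obtain ⟨k', v'⟩ := r
      by_cases h1 : v' < v
      · have h2 : ¬ v ≤ v' := by omega
        simp [h1, h2]
      · have h2 : v ≤ v' := by omega
        simp [h1, h2]

-- ===== VERDICT (by name: the statement is the Claim_ definition above) =====
theorem rm_smallest_spec : Claim_equal_rm_smallest := by
  intro d _ hpre
  unfold Spec_rm_smallest
  rw [rm_smallest_alt_eq]
  unfold rm_smallest
  cases d with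
  | nil => simp [pvFMin]
  | cons p t =>
    obtain ⟨k0, v0⟩ := p
    simp only [if_neg (List.cons_ne_nil _ _)]
    cases hm : PySem.List.min? (((k0, v0) :: t).map Prod.snd) (fun x => x) with
    | none =>
      simp only [List.map_cons] at hm
      rw [PySem.List.min?_id_cons] at hm
      cases hm
    | some m =>
      have hmem : m ∈ ((k0, v0) :: t).map Prod.snd := PySem.List.min?_mem hm
      have hmin : ∀ y ∈ ((k0, v0) :: t).map Prod.snd, m ≤ y := PySem.List.min?_isMin hm
      obtain ⟨h1, h2⟩ := pvFKey_eq_fmin ((k0, v0) :: t) m hmem hmin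
      dsimp only
      rw [pvRmLoop_eq_fkey ((k0, v0) :: t) m ((k0, v0) :: t)
        (fun p hp => pvDGet_of_mem _ hpre p.1 p.2 hp), h1]
      cases hq : pvFMin ((k0, v0) :: t) with
      | none => simp
      | some r => obtain ⟨k', v'⟩ := r; simp
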